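-- pv_equiv track=rewrite | github.com/Jack-411/MATE60003-Stage-2 | Heatmap.py | _split_into_bands
-- ===== SOURCE A (Python) =====
-- def _split_into_bands(k, f):
--     bands = []
--     start = 0
--     for i in range(1, len(k)):
--         if k[i] < k[i - 1]:
--             bands.append((k[start:i], f[start:i]))
--             start = i
--     if start < len(k):
--         bands.append((k[start:], f[start:]))
--     return bands
-- ===== SOURCE B (Python) =====
-- def _split_into_bands(k, f):
--     if not k:
--         return []
--     cuts = [i for i in range(1, len(k)) if k[i] < k[i - 1]]
--     starts = [0] + cuts
--     inner = [(k[b:e], f[b:e]) for b, e in zip(starts, cuts)]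
--     last = starts[-1]
--     return inner + [(k[last:], f[last:])]
-- ===== Notes on version B (the rewrite author's own statement) =====
-- stated objective: alternative
-- what changed: B first computes the list of descent boundaries in one pass and then materializes all bands with slices in a second pass, instead of A's slice-as-you-go loop with mutable start state.
import Mathlib
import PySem

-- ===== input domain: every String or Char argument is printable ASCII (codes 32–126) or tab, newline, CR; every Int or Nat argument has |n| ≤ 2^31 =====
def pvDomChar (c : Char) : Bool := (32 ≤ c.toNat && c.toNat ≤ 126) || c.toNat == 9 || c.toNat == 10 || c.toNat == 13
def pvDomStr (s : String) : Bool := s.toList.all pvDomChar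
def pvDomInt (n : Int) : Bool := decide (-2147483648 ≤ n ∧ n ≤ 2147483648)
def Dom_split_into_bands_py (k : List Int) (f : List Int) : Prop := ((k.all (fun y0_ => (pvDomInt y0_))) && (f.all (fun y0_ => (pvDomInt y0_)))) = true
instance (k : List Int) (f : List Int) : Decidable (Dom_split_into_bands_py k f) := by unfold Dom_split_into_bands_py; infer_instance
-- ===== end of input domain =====

-- B computes the descent boundaries first, then materializes all bands with slices; alternative two-pass decomposition of A's slice-as-you-go loop.


-- ===== PORT A =====
def split_into_bands_py (k : List Int) (f : List Int) : List (List Int × List Int) :=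
  let n : Int := PySem.List.len k
  let st := (PySem.List.pyRange 1 n 1).foldl
    (fun (s : List (List Int × List Int) × Int) i =>
      if PySem.List.pyGetD k i 0 < PySem.List.pyGetD k (i - 1) 0 then
        (s.1 ++ [(PySem.List.slice k (some s.2) (some i), PySem.List.slice f (some s.2) (some i))], i)
      else s)
    ([], 0)
  if st.2 < n then
    st.1 ++ [(PySem.List.slice k (some st.2) none, PySem.List.slice f (some st.2) none)]
  else st.1

-- ===== PORT B =====
def split_into_bands_py_alt (k : List Int) (f : List Int) : List (List Int × List Int) :=
  if k = [] then []
  else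
    let cuts := (PySem.List.pyRange 1 (PySem.List.len k) 1).filter
      (fun i => PySem.List.pyGetD k i 0 < PySem.List.pyGetD k (i - 1) 0)
    let starts : List Int := 0 :: cuts
    let inner := (starts.zip cuts).map (fun be =>
      (PySem.List.slice k (some be.1) (some be.2), PySem.List.slice f (some be.1) (some be.2)))
    let last := PySem.List.pyGetD starts (-1) 0
    inner ++ [(PySem.List.slice k (some last) none, PySem.List.slice f (some last) none)]

-- ===== PRECONDITION & SPEC =====
def Spec_split_into_bands_py (k : List Int) (f : List Int) (out : List (List Int × List Int)) : Prop := out = split_into_bands_py_alt k f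
instance (k : List Int) (f : List Int) (out : List (List Int × List Int)) : Decidable (Spec_split_into_bands_py k f out) := by unfold Spec_split_into_bands_py; infer_instance

-- ===== CLAIM (what is proved, stated in full; the proofs are below) =====
def Claim_equal_split_into_bands_py : Prop := ∀ (k : List Int) (f : List Int), Dom_split_into_bands_py k f → Spec_split_into_bands_py k f (split_into_bands_py k f)

-- ===== LEMMAS AND PROOFS =====

-- the list of bands A's loop has appended so far, as a function of the pending start s and the remaining indices
def pvChunks (k f : List Int) (s : Int) : List Int → List (List Int × List Int)
  | [] => []
  | i :: r =>
    if PySem.List.pyGetD k i 0 < PySem.List.pyGetD k (i - 1) 0 then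
      (PySem.List.slice k (some s) (some i), PySem.List.slice f (some s) (some i)) :: pvChunks k f i r
    else pvChunks k f s r

-- the value of A's `start` after the loop
def pvLast (k : List Int) (s : Int) : List Int → Int
  | [] => s
  | i :: r => if PySem.List.pyGetD k i 0 < PySem.List.pyGetD k (i - 1) 0 then pvLast k i r else pvLast k s r

theorem pvLoop (k f : List Int) (r : List Int) (acc : List (List Int × List Int)) (s : Int) :
    r.foldl
      (fun (st : List (List Int × List Int) × Int) i =>
        if PySem.List.pyGetD k i 0 < PySem.List.pyGetD k (i - 1) 0 then
          (st.1 ++ [(PySem.List.slice k (some st.2) (some i), PySem.List.slice f (some st.2) (some i))], i)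
        else st)
      (acc, s)
    = (acc ++ pvChunks k f s r, pvLast k s r) := by
  induction r generalizing acc s with
  | nil => simp [pvChunks, pvLast]
  | cons i r ih =>
    by_cases h : PySem.List.pyGetD k i 0 < PySem.List.pyGetD k (i - 1) 0 <;>
      simp [pvChunks, pvLast, h, ih]

theorem pvChunks_zip (k f : List Int) (r : List Int) (s : Int) :
    pvChunks k f s r =
      ((s :: r.filter (fun i => PySem.List.pyGetD k i 0 < PySem.List.pyGetD k (i - 1) 0)).zip
        (r.filter (fun i => PySem.List.pyGetD k i 0 < PySem.List.pyGetD k (i - 1) 0))).map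
        (fun be => (PySem.List.slice k (some be.1) (some be.2), PySem.List.slice f (some be.1) (some be.2))) := by
  induction r generalizing s with
  | nil => simp [pvChunks]
  | cons i r ih =>
    by_cases h : PySem.List.pyGetD k i 0 < PySem.List.pyGetD k (i - 1) 0 <;>
      simp [pvChunks, h, ih]

theorem pvLast_getLast (k : List Int) (r : List Int) (s : Int) :
    pvLast k s r =
      (s :: r.filter (fun i => PySem.List.pyGetD k i 0 < PySem.List.pyGetD k (i - 1) 0)).getLast
        (List.cons_ne_nil _ _) := by
  induction r generalizing s with
  | nil => simp [pvLast]
  | cons i r ih =>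
    by_cases h : PySem.List.pyGetD k i 0 < PySem.List.pyGetD k (i - 1) 0
    · simp only [pvLast, List.filter_cons, h, decide_true, ih]
      exact (List.getLast_cons (List.cons_ne_nil _ _)).symm
    · simp [pvLast, h, ih]

theorem pvLast_mem (k : List Int) (r : List Int) (s : Int) :
    pvLast k s r = s ∨ pvLast k s r ∈ r := by
  induction r generalizing s with
  | nil => simp [pvLast]
  | cons i r ih =>
    by_cases h : PySem.List.pyGetD k i 0 < PySem.List.pyGetD k (i - 1) 0
    · simp only [pvLast, if_pos h]
      rcases ih i with h1 | h1 <;> simp [h1]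
    · simp only [pvLast, if_neg h]
      rcases ih s with h1 | h1 <;> simp [h1]

-- ===== VERDICT (by name: the statement is the Claim_ definition above) =====
theorem split_into_bands_py_spec : Claim_equal_split_into_bands_py := by
  intro k f _
  unfold Spec_split_into_bands_py split_into_bands_py split_into_bands_py_alt
  by_cases hk : k = []
  · subst hk; simp [PySem.List.pyRange_one_eq_nil]
  · simp only [if_neg hk, PySem.List.len_eq, pvLoop]
    have hlt : pvLast k 0 (PySem.List.pyRange 1 (k.length : Int) 1) < (k.length : Int) := by
      rcases pvLast_mem k (PySem.List.pyRange 1 (k.length : Int) 1) 0 with h | h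
      · rw [h]
        have : k.length ≠ 0 := by simpa using hk
        omega
      · exact (PySem.List.mem_pyRange_one.mp h).2
    rw [if_pos hlt, pvChunks_zip, pvLast_getLast,
      PySem.List.pyGetD_neg_one _ 0 (List.cons_ne_nil _ _)]
    simp
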